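-- pv_equiv track=rewrite | github.com/PondSec/marc_agent | agent/prompts.py | _interaction_assertion_line
-- ===== SOURCE A (Python) =====
-- def _interaction_assertion_line(text: str) -> bool:
--     lowered = str(text or "").strip().lower()
--     if not lowered:
--         return False
--     return any(
--         marker in lowered
--         for marker in (
--             "assert.equal(",
--             "assert.strictequal(",
--             "assert.deepstrictequal(",
--             "expect(",
--             ".tobe(",
--             ".toequal(",
--             ".tostrictequal(",
--             ".tohaveattribute(",
--             ".tohaveproperty(",
--         )
--     )
-- ===== SOURCE B (Python) =====
-- _MARKERS = (
--     "assert.equal(",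
--     "assert.strictequal(",
--     "assert.deepstrictequal(",
--     "expect(",
--     ".tobe(",
--     ".toequal(",
--     ".tostrictequal(",
--     ".tohaveattribute(",
--     ".tohaveproperty(",
-- )
--
--
-- def _interaction_assertion_line(text: str) -> bool:
--     # One left-to-right scan over positions: at each index test whether any
--     # marker starts there, instead of a separate substring search per marker.
--     s = str(text or "").strip().lower()
--     return any(s.startswith(m, i) for i in range(len(s)) for m in _MARKERS)
-- ===== Notes on version B (the rewrite author's own statement) =====
-- stated objective: alternative
-- what changed: Instead of running a separate substring search over the line for each of the nine markers, B makes one left-to-right scan over the positions of the normalized line and at each index tests whether any marker starts there (startswith with an offset).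
import Mathlib
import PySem

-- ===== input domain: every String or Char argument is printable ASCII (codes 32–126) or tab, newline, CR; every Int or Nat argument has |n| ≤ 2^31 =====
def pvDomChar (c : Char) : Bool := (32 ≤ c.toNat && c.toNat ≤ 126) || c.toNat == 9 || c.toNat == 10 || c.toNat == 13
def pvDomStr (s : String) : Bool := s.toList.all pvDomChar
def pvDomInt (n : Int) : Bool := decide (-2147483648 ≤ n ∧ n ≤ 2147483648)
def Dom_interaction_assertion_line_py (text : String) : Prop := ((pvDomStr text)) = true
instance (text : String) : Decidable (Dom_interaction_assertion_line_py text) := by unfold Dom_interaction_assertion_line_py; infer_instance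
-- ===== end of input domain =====

-- B replaces A's nine independent substring searches by one positional scan
-- (at each index, test whether some marker starts there); objective: alternative.

-- the assertion markers (shared module constant of both programs)
def pvMarkers : List String :=
  ["assert.equal(", "assert.strictequal(", "assert.deepstrictequal(",
   "expect(", ".tobe(", ".toequal(", ".tostrictequal(",
   ".tohaveattribute(", ".tohaveproperty("]

-- ===== PORT A =====
def interaction_assertion_line_py (text : String) : Bool :=
  -- lowered = str(text or "").strip().lower()   ('text or ""' is 'text' for a str argument)
  let lowered := PySem.Str.lower (PySem.Str.strip text)
  -- if not lowered: return False
  if PySem.Str.len lowered == 0 then false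
  -- return any(marker in lowered for marker in (…))
  else pvMarkers.any (fun m => PySem.Str.isIn m lowered)

-- ===== PORT B =====
def interaction_assertion_line_py_alt (text : String) : Bool :=
  -- s = str(text or "").strip().lower()
  let s := PySem.Chars.lower (PySem.Chars.strip text.toList)
  -- any(s.startswith(m, i) for i in range(len(s)) for m in _MARKERS)
  (List.range s.length).any (fun i =>
    (pvMarkers.map String.toList).any (fun m => m.isPrefixOf (s.drop i)))

-- ===== PRECONDITION & SPEC =====
def Spec_interaction_assertion_line_py (text : String) (out : Bool) : Prop := out = interaction_assertion_line_py_alt text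
instance (text : String) (out : Bool) : Decidable (Spec_interaction_assertion_line_py text out) := by unfold Spec_interaction_assertion_line_py; infer_instance

-- ===== CLAIM (what is proved, stated in full; the proofs are below) =====
def Claim_equal_interaction_assertion_line_py : Prop := ∀ (text : String), Dom_interaction_assertion_line_py text → Spec_interaction_assertion_line_py text (interaction_assertion_line_py text)

-- ===== LEMMAS AND PROOFS =====

-- the positional scan of B finds a marker iff Python's 'marker in s' does,
-- provided every marker is nonempty
theorem pv_scan_eq_isIn (ms : List String) (s : List Char)
    (h : ∀ m ∈ ms, m.toList ≠ []) :
    ((List.range s.length).any (fun i =>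
        (ms.map String.toList).any (fun m => m.isPrefixOf (s.drop i))))
      = ms.any (fun m => PySem.Chars.isIn m.toList s) := by
  rw [Bool.eq_iff_iff]
  simp only [List.any_eq_true, List.mem_range, List.mem_map, List.isPrefixOf_iff_prefix]
  constructor
  · rintro ⟨i, _, _, ⟨m, hm, rfl⟩, hp⟩
    exact ⟨m, hm, (PySem.Chars.exists_prefix_drop_iff_isIn m.toList s).mp ⟨i, hp⟩⟩
  · rintro ⟨m, hm, hin⟩
    obtain ⟨j, hp⟩ := (PySem.Chars.exists_prefix_drop_iff_isIn m.toList s).mpr hin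
    refine ⟨j, ?_, m.toList, ⟨m, hm, rfl⟩, hp⟩
    by_contra hj
    have hdrop : s.drop j = [] := List.drop_eq_nil_of_le (by omega)
    exact h m hm (List.prefix_nil.mp (hdrop ▸ hp))

-- ===== VERDICT (by name: the statement is the Claim_ definition above) =====
theorem interaction_assertion_line_py_spec : Claim_equal_interaction_assertion_line_py := by
  intro text _
  unfold Spec_interaction_assertion_line_py
  have hne : ∀ m ∈ pvMarkers, m.toList ≠ [] := by decide
  have key := pv_scan_eq_isIn pvMarkers (PySem.Chars.lower (PySem.Chars.strip text.toList)) hne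
  simp only [interaction_assertion_line_py, interaction_assertion_line_py_alt,
    PySem.Str.len_eq, PySem.Str.toList_lower, PySem.Str.toList_strip, PySem.Str.isIn_eq, key]
  by_cases hs : PySem.Chars.lower (PySem.Chars.strip text.toList) = []
  · simp only [hs, List.length_nil]
    rw [if_pos (by decide)]
    symm
    rw [List.any_eq_false]
    intro m hm
    rw [PySem.Chars.isIn_iff_infix, List.infix_nil]
    exact hne m hm
  · have hlen : (PySem.Chars.lower (PySem.Chars.strip text.toList)).length ≠ 0 := by
      simpa [List.length_eq_zero_iff] using hs
    simp [hlen]
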